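-- pv_equiv track=rewrite | github.com/swackhamer/tldr-dump | tldr_to_markdown.py | parse_tldr_output
-- ===== SOURCE A (Python) =====
-- from typing import List, Tuple, Optional
--
-- def parse_tldr_output(content: str) -> Tuple[str, List[Tuple[str, str]]]:
--     """
--     Parse tldr output into description and examples.
--     Returns: (description, [(description, command), ...])
--     """
--     lines = content.strip().split('\n')
--
--     description = ""
--     examples = []
--     current_example_desc = []
--
--     i = 0
--     # Get main description (first lines before examples)
--     while i < len(lines) and not lines[i].strip().endswith(':'):
--         if lines[i].strip():
--             description += lines[i].strip() + " "
--         i += 1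
--
--     description = description.strip()
--
--     # Parse examples
--     while i < len(lines):
--         line = lines[i].strip()
--
--         if line.endswith(':'):
--             # This is an example description
--             current_example_desc = [line[:-1]]  # Remove colon
--         elif line and current_example_desc:
--             # This is the command for the current example
--             if not line.startswith('More information:'):
--                 examples.append((' '.join(current_example_desc), line))
--             current_example_desc = []
--
--         i += 1
--
--     return description, examples
-- ===== SOURCE B (Python) =====
-- def parse_tldr_output(content: str):
--     """Staged parse: strip all lines, split them into explicit segments at the
--     colon-terminated lines, then read the description off segment 0 and one example off each
--     later segment -- no running parser state."""
--     lines = [l.strip() for l in content.strip().split('\n')]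
--     segments = [[]]
--     for l in lines:
--         if l.endswith(':'):
--             segments.append([l[:-1]])
--         else:
--             segments[-1].append(l)
--     description = ' '.join(l for l in segments[0] if l)
--     examples = []
--     for seg in segments[1:]:
--         cmd = next((l for l in seg[1:] if l), None)
--         if cmd is not None and not cmd.startswith('More information:'):
--             examples.append((seg[0], cmd))
--     return description, examples
-- ===== Notes on version B (the rewrite author's own statement) =====
-- stated objective: alternative
-- what changed: B replaces A's sequential state-machine scan (index i, running description string, current_example_desc register) by a staged pipeline: strip all lines, group them into an explicit list of segments split at the colon-terminated lines, then derive the description from segment 0 and extract at most one example from each later segment independently.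
import Mathlib
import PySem

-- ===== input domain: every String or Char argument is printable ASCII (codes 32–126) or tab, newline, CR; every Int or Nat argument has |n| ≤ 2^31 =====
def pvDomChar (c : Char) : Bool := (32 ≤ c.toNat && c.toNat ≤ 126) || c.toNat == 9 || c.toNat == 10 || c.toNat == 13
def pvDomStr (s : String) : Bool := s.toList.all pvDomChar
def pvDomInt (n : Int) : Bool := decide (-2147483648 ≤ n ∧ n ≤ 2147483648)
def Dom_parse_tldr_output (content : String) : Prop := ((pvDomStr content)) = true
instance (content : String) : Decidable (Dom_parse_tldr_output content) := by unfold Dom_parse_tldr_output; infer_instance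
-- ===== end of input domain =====

-- B replaces A's sequential state-machine scan by a staged pipeline (strip lines, group into explicit segments at the colon-terminated lines, read description/examples off the segments); objective: alternative decomposition, return value proved equal.


-- ===== PORT A =====
-- first while loop: collect the description until a line stripped ends with ':'
def pvA_descLoop : List String → String → (String × List String)
  | [], d => (d, [])
  | l :: ls, d =>
    if PySem.Str.endswith (PySem.Str.strip l) ":" then (d, l :: ls)
    else pvA_descLoop ls (if PySem.Str.strip l ≠ "" then d ++ PySem.Str.strip l ++ " " else d)

-- second while loop: parse the examples
def pvA_exLoop : List String → List String → List (String × String) → List (String × String)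
  | [], _, ex => ex
  | l :: ls, cur, ex =>
    let line := PySem.Str.strip l
    if PySem.Str.endswith line ":" then
      pvA_exLoop ls [PySem.Str.slice line none (some (-1))] ex
    else if line ≠ "" ∧ cur ≠ [] then
      if ¬ PySem.Str.startswith line "More information:" then
        pvA_exLoop ls [] (ex ++ [(PySem.Str.join " " cur, line)])
      else pvA_exLoop ls [] ex
    else pvA_exLoop ls cur ex

def parse_tldr_output (content : String) : String × (List (String × String)) :=
  let lines := (PySem.Str.split? (PySem.Str.strip content) "\n").getD []
  let p := pvA_descLoop lines ""
  (PySem.Str.strip p.1, pvA_exLoop p.2 [] [])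

-- ===== PORT B =====
-- segments[-1].append(l) / segments.append([l[:-1]]) of Source B's grouping loop
def pvB_addLine (segs : List (List String)) (l : String) : List (List String) :=
  if PySem.Str.endswith l ":" then segs ++ [[PySem.Str.slice l none (some (-1))]]
  else segs.dropLast ++ [segs.getLastD [] ++ [l]]

-- next((l for l in … if l), None)
def pvB_firstCmd? : List String → Option String
  | [] => none
  | l :: ls => if l ≠ "" then some l else pvB_firstCmd? ls

-- body of Source B's per-segment loop
def pvB_emit (ex : List (String × String)) (seg : List String) : List (String × String) :=
  match pvB_firstCmd? (PySem.List.slice seg (some 1) none) with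
  | none => ex
  | some cmd =>
    if ¬ PySem.Str.startswith cmd "More information:" then
      ex ++ [(PySem.List.pyGetD seg 0 "", cmd)]
    else ex

def parse_tldr_output_alt (content : String) : String × (List (String × String)) :=
  let lines := ((PySem.Str.split? (PySem.Str.strip content) "\n").getD []).map PySem.Str.strip
  let segments := lines.foldl pvB_addLine [[]]
  let description := PySem.Str.join " " ((PySem.List.pyGetD segments 0 []).filter (fun l => l ≠ ""))
  let examples := (PySem.List.slice segments (some 1) none).foldl pvB_emit []
  (description, examples)

-- ===== PRECONDITION & SPEC =====
def Spec_parse_tldr_output (content : String) (out : String × (List (String × String))) : Prop := out = parse_tldr_output_alt content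
instance (content : String) (out : String × (List (String × String))) : Decidable (Spec_parse_tldr_output content out) := by unfold Spec_parse_tldr_output; infer_instance

-- ===== CLAIM =====
def Claim_equal_parse_tldr_output : Prop := ∀ (content : String), Dom_parse_tldr_output content → Spec_parse_tldr_output content (parse_tldr_output content)

-- ===== LEMMAS AND PROOFS =====

-- A's running description accumulator, as a function of the collected stripped lines
def pvDOf (ws : List String) : String := (ws.filter (fun l => l ≠ "")).foldl (fun d w => d ++ w ++ " ") ""

-- ---- generic string facts about strip/join ----

theorem pv_lstrip_cons {a : Char} {t : List Char} (h : PySem.Chars.isspace a = false) :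
    PySem.Chars.lstrip (a :: t) = a :: t := by
  simp [PySem.Chars.lstrip, h]

theorem pv_head_not_space {a : Char} {t : List Char} (h : PySem.Chars.lstrip (a :: t) = a :: t) :
    PySem.Chars.isspace a = false := by
  by_cases hs : PySem.Chars.isspace a = true
  · exfalso
    have := List.length_dropWhile_le PySem.Chars.isspace t
    simp [PySem.Chars.lstrip, hs] at h
    have := congrArg List.length h
    simp at this
    omega
  · simpa using hs

theorem pv_rstrip_prefix (x : List Char) : PySem.Chars.rstrip x <+: x := by
  have h : (List.dropWhile PySem.Chars.isspace x.reverse) <:+ x.reverse := List.dropWhile_suffix _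
  have := List.reverse_prefix.mpr h
  simpa [PySem.Chars.rstrip] using this

theorem pv_fix_of_strip_fix {cs : List Char} (h : PySem.Chars.strip cs = cs) :
    PySem.Chars.lstrip cs = cs ∧ PySem.Chars.rstrip cs = cs := by
  have h1 : (PySem.Chars.lstrip cs).length ≤ cs.length := List.length_dropWhile_le _ _
  have h2 : (PySem.Chars.rstrip (PySem.Chars.lstrip cs)).length ≤ (PySem.Chars.lstrip cs).length :=
    (pv_rstrip_prefix _).length_le
  have hlen : (PySem.Chars.lstrip cs).length = cs.length := by
    have := congrArg List.length h
    simp only [PySem.Chars.strip] at this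
    omega
  have hls : PySem.Chars.lstrip cs = cs :=
    (List.dropWhile_suffix _).eq_of_length hlen
  refine ⟨hls, ?_⟩
  have : PySem.Chars.strip cs = PySem.Chars.rstrip cs := by
    simp [PySem.Chars.strip, hls]
  rw [← this, h]

theorem pv_lstrip_append {v t : List Char} (hv : v ≠ []) (h : PySem.Chars.lstrip v = v) :
    PySem.Chars.lstrip (v ++ t) = v ++ t := by
  cases v with
  | nil => exact absurd rfl hv
  | cons a s =>
    have := pv_head_not_space h
    simp [PySem.Chars.lstrip, this]

theorem pv_rstrip_append_space (x : List Char) :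
    PySem.Chars.rstrip (x ++ [' ']) = PySem.Chars.rstrip x := by
  simp [PySem.Chars.rstrip, List.reverse_append,
        show PySem.Chars.isspace ' ' = true from by decide]

theorem pv_rstrip_append {x v : List Char} (hv : v ≠ []) (h : PySem.Chars.rstrip v = v) :
    PySem.Chars.rstrip (x ++ v) = x ++ v := by
  have hrv : List.dropWhile PySem.Chars.isspace v.reverse = v.reverse := by
    have := congrArg List.reverse h
    simpa [PySem.Chars.rstrip] using this
  have hne : v.reverse ≠ [] := by simpa using hv
  cases hr : v.reverse with
  | nil => exact absurd hr hne
  | cons a s =>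
    rw [hr] at hrv
    have ha : PySem.Chars.isspace a = false := by
      by_cases hs : PySem.Chars.isspace a = true
      · exfalso
        have := List.length_dropWhile_le PySem.Chars.isspace s
        simp [hs] at hrv
        have := congrArg List.length hrv
        simp at this
        omega
      · simpa using hs
    simp [PySem.Chars.rstrip, List.reverse_append, hr, ha]
    rw [show v = s.reverse ++ [a] by rw [← List.reverse_reverse v, hr]; simp]

theorem pv_strip_idem_chars (cs : List Char) :
    PySem.Chars.strip (PySem.Chars.strip cs) = PySem.Chars.strip cs := by
  have hlsu : PySem.Chars.lstrip (PySem.Chars.lstrip cs) = PySem.Chars.lstrip cs := by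
    simp [PySem.Chars.lstrip, List.dropWhile_idempotent]
  have hrr : PySem.Chars.rstrip (PySem.Chars.rstrip (PySem.Chars.lstrip cs))
      = PySem.Chars.rstrip (PySem.Chars.lstrip cs) := by
    simp [PySem.Chars.rstrip, List.reverse_reverse, List.dropWhile_idempotent]
  have hls : PySem.Chars.lstrip (PySem.Chars.rstrip (PySem.Chars.lstrip cs))
      = PySem.Chars.rstrip (PySem.Chars.lstrip cs) := by
    obtain ⟨t2, ht⟩ := pv_rstrip_prefix (PySem.Chars.lstrip cs)
    cases hrc : PySem.Chars.rstrip (PySem.Chars.lstrip cs) with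
    | nil => simp [PySem.Chars.lstrip]
    | cons a t =>
      rw [hrc] at ht
      have hu : PySem.Chars.lstrip cs = a :: (t ++ t2) := by rw [← ht]; simp
      exact pv_lstrip_cons (pv_head_not_space (hu ▸ hlsu))
  simp only [PySem.Chars.strip]
  rw [hls, hrr]

theorem pv_strip_idem (s : String) : PySem.Str.strip (PySem.Str.strip s) = PySem.Str.strip s := by
  apply String.toList_inj.mp
  rw [PySem.Str.toList_strip, PySem.Str.toList_strip]
  exact pv_strip_idem_chars s.toList

theorem pvJoin_singleton (s : String) : PySem.Str.join " " [s] = s := by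
  apply String.toList_inj.mp
  rw [PySem.Str.toList_join]
  exact PySem.Chars.join_singleton " ".toList s.toList

-- foldl accumulation = join + trailing space (Chars level)
theorem pv_foldl_join (vs : List (List Char)) (hne : vs ≠ []) (d : List Char) :
    vs.foldl (fun d w => d ++ w ++ [' ']) d = d ++ PySem.Chars.join [' '] vs ++ [' '] := by
  induction vs generalizing d with
  | nil => exact absurd rfl hne
  | cons v vs ih =>
    cases vs with
    | nil => simp [List.foldl, PySem.Chars.join_singleton]
    | cons v2 rest =>
      rw [List.foldl_cons, ih (by simp), PySem.Chars.join_cons_cons]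
      simp [List.append_assoc]

theorem pv_join_ne_nil (vs : List (List Char)) (hne : vs ≠ []) (h : ∀ v ∈ vs, v ≠ []) :
    PySem.Chars.join [' '] vs ≠ [] := by
  cases vs with
  | nil => exact absurd rfl hne
  | cons v vs =>
    cases vs with
    | nil => rw [PySem.Chars.join_singleton]; exact h v (by simp)
    | cons v2 rest =>
      rw [PySem.Chars.join_cons_cons]
      have := h v (by simp)
      simp [this]

theorem pv_rstrip_join (vs : List (List Char)) (hne : vs ≠ [])
    (h : ∀ v ∈ vs, v ≠ [] ∧ PySem.Chars.rstrip v = v) :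
    PySem.Chars.rstrip (PySem.Chars.join [' '] vs) = PySem.Chars.join [' '] vs := by
  induction vs with
  | nil => exact absurd rfl hne
  | cons v vs ih =>
    cases vs with
    | nil => rw [PySem.Chars.join_singleton]; exact (h v (by simp)).2
    | cons v2 rest =>
      rw [PySem.Chars.join_cons_cons]
      exact pv_rstrip_append
        (pv_join_ne_nil _ (by simp) (fun w hw => (h w (by simp [hw])).1))
        (ih (by simp) (fun w hw => h w (by simp [hw])))

theorem pv_strip_join (vs : List (List Char)) (h : ∀ v ∈ vs, v ≠ [] ∧ PySem.Chars.strip v = v) :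
    PySem.Chars.strip (PySem.Chars.join [' '] vs ++ [' ']) = PySem.Chars.join [' '] vs := by
  cases vs with
  | nil => decide
  | cons v vs' =>
    have hv := h v (by simp)
    have hfix := pv_fix_of_strip_fix hv.2
    have h1 : PySem.Chars.lstrip (PySem.Chars.join [' '] (v :: vs') ++ [' '])
        = PySem.Chars.join [' '] (v :: vs') ++ [' '] := by
      cases vs' with
      | nil =>
        rw [PySem.Chars.join_singleton]
        exact pv_lstrip_append hv.1 hfix.1
      | cons w rest =>
        rw [PySem.Chars.join_cons_cons]
        simp only [List.append_assoc]
        exact pv_lstrip_append hv.1 hfix.1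
    simp only [PySem.Chars.strip]
    rw [h1, pv_rstrip_append_space]
    exact pv_rstrip_join _ (by simp)
      (fun w hw => ⟨(h w hw).1, (pv_fix_of_strip_fix (h w hw).2).2⟩)

-- key description lemma (Str level)
theorem pvSL (vs : List String) (h : ∀ v ∈ vs, v ≠ "" ∧ PySem.Str.strip v = v) :
    PySem.Str.strip (vs.foldl (fun d w => d ++ w ++ " ") "") = PySem.Str.join " " vs := by
  have hfold : ∀ (us : List String) (d : String),
      (us.foldl (fun d w => d ++ w ++ " ") d).toList
        = (us.map String.toList).foldl (fun d w => d ++ w ++ [' ']) d.toList := by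
    intro us
    induction us with
    | nil => intro d; rfl
    | cons w ws ih =>
      intro d
      rw [List.foldl_cons, List.map_cons, List.foldl_cons, ih]
      simp [String.toList_append]
  have htrans : ∀ w ∈ vs.map String.toList, w ≠ [] ∧ PySem.Chars.strip w = w := by
    intro w hw
    obtain ⟨v, hv, rfl⟩ := List.mem_map.mp hw
    refine ⟨fun hnil => (h v hv).1 (String.toList_inj.mp (by simp [hnil])), ?_⟩
    rw [← PySem.Str.toList_strip, (h v hv).2]
  apply String.toList_inj.mp
  rw [PySem.Str.toList_strip, hfold, PySem.Str.toList_join]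
  cases vs with
  | nil => decide
  | cons v vs' =>
    rw [pv_foldl_join _ (by simp)]
    simpa using pv_strip_join _ htrans

-- ---- facts about B's helpers ----

theorem pv_firstCmd_append_empty (b : List String) :
    pvB_firstCmd? (b ++ [""]) = pvB_firstCmd? b := by
  induction b with
  | nil => simp [pvB_firstCmd?]
  | cons x xs ih => by_cases hx : x = "" <;> simp [pvB_firstCmd?, hx, ih]

theorem pv_firstCmd_append_some {b : List String} {c : String} (x : String)
    (h : pvB_firstCmd? b = some c) : pvB_firstCmd? (b ++ [x]) = some c := by
  induction b with
  | nil => simp [pvB_firstCmd?] at h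
  | cons y ys ih =>
    by_cases hy : y = "" <;> simp [pvB_firstCmd?, hy] at h ⊢
    · exact ih h
    · exact h

theorem pv_firstCmd_append_none {b : List String} {x : String}
    (h : pvB_firstCmd? b = none) (hx : x ≠ "") : pvB_firstCmd? (b ++ [x]) = some x := by
  induction b with
  | nil => simp [pvB_firstCmd?, hx]
  | cons y ys ih =>
    by_cases hy : y = "" <;> simp [pvB_firstCmd?, hy] at h ⊢
    · exact ih h

theorem pv_emit_cons (ex : List (String × String)) (h : String) (b : List String) :
    pvB_emit ex (h :: b) = match pvB_firstCmd? b with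
      | none => ex
      | some cmd => if ¬ PySem.Str.startswith cmd "More information:" then ex ++ [(h, cmd)] else ex := by
  simp [pvB_emit, PySem.List.slice_from_one, PySem.List.pyGetD_zero_cons]

theorem pv_addLine_prepend (S : List String) (P q : List (List String)) (hq : q ≠ []) :
    S.foldl pvB_addLine (P ++ q) = P ++ S.foldl pvB_addLine q := by
  induction S generalizing q with
  | nil => rfl
  | cons s S ih =>
    have hstep : pvB_addLine (P ++ q) s = P ++ pvB_addLine q s := by
      unfold pvB_addLine
      by_cases hc : PySem.Str.endswith s ":" = true
      · rw [if_pos hc, if_pos hc, List.append_assoc]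
      · rw [if_neg hc, if_neg hc, List.dropLast_append]
        have : q.isEmpty = false := by simpa [List.isEmpty_iff] using hq
        rw [this]
        have hlast : (P ++ q).getLastD [] = q.getLastD [] := by
          rw [List.getLastD_eq_getLast?, List.getLastD_eq_getLast?,
              List.getLast?_append_of_ne_nil _ hq]
        rw [hlast]
        simp
    have hne : pvB_addLine q s ≠ [] := by
      unfold pvB_addLine
      by_cases hc : PySem.Str.endswith s ":" = true
      · rw [if_pos hc]; simp
      · rw [if_neg hc]; simp
    rw [List.foldl_cons, List.foldl_cons, hstep, ih _ hne]

-- ---- phase 2: A's example loop = B's segment fold ----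

-- A's register state for B's open segment h :: b
def pvCurOf (b : List String) (h : String) : List String :=
  match pvB_firstCmd? b with | none => [h] | some _ => []

theorem pv_emit_of_none {b : List String} (h : String) (ex : List (String × String))
    (hfc : pvB_firstCmd? b = none) : pvB_emit ex (h :: b) = ex := by
  rw [pv_emit_cons, hfc]

theorem pvQ (L : List String) (h : String) (b : List String) (ex : List (String × String)) :
    pvA_exLoop L (pvCurOf b h) (pvB_emit ex (h :: b))
    = ((L.map PySem.Str.strip).foldl pvB_addLine [h :: b]).foldl pvB_emit ex := by
  induction L generalizing h b ex with
  | nil => rfl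
  | cons l L ih =>
    simp only [List.map_cons, List.foldl_cons, pvA_exLoop]
    by_cases hc : PySem.Str.endswith (PySem.Str.strip l) ":" = true
    · rw [if_pos hc]
      have hstep : pvB_addLine [h :: b] (PySem.Str.strip l)
          = [h :: b] ++ [[PySem.Str.slice (PySem.Str.strip l) none (some (-1))]] := by
        unfold pvB_addLine; rw [if_pos hc]
      rw [hstep, pv_addLine_prepend _ _ _ (by simp), List.foldl_append]
      have := ih (PySem.Str.slice (PySem.Str.strip l) none (some (-1))) [] (pvB_emit ex (h :: b))
      rw [show pvCurOf [] (PySem.Str.slice (PySem.Str.strip l) none (some (-1)))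
            = [PySem.Str.slice (PySem.Str.strip l) none (some (-1))] from rfl,
          pv_emit_of_none _ _ (show pvB_firstCmd? ([] : List String) = none from rfl)] at this
      exact this
    · rw [if_neg hc]
      have hstep : pvB_addLine [h :: b] (PySem.Str.strip l) = [h :: (b ++ [PySem.Str.strip l])] := by
        unfold pvB_addLine
        rw [if_neg hc]
        simp
      rw [hstep]
      by_cases he : PySem.Str.strip l = ""
      · have hcond : ¬ (PySem.Str.strip l ≠ "" ∧ pvCurOf b h ≠ []) := by simp [he]
        rw [if_neg hcond]
        have hfc : pvB_firstCmd? (b ++ [PySem.Str.strip l]) = pvB_firstCmd? b := by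
          rw [he]; exact pv_firstCmd_append_empty b
        have hcur : pvCurOf (b ++ [PySem.Str.strip l]) h = pvCurOf b h := by
          unfold pvCurOf; rw [hfc]
        have hem : pvB_emit ex (h :: (b ++ [PySem.Str.strip l])) = pvB_emit ex (h :: b) := by
          rw [pv_emit_cons, pv_emit_cons, hfc]
        have := ih h (b ++ [PySem.Str.strip l]) ex
        rw [hcur, hem] at this
        exact this
      · cases hfc : pvB_firstCmd? b with
        | some c =>
          have hcond : ¬ (PySem.Str.strip l ≠ "" ∧ pvCurOf b h ≠ []) := by
            simp [pvCurOf, hfc]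
          rw [if_neg hcond]
          have hfc' : pvB_firstCmd? (b ++ [PySem.Str.strip l]) = some c :=
            pv_firstCmd_append_some _ hfc
          have hcur : pvCurOf (b ++ [PySem.Str.strip l]) h = pvCurOf b h := by
            unfold pvCurOf; rw [hfc', hfc]
          have hem : pvB_emit ex (h :: (b ++ [PySem.Str.strip l])) = pvB_emit ex (h :: b) := by
            rw [pv_emit_cons, pv_emit_cons, hfc', hfc]
          have := ih h (b ++ [PySem.Str.strip l]) ex
          rw [hcur, hem] at this
          exact this
        | none =>
          have hcur0 : pvCurOf b h = [h] := by unfold pvCurOf; rw [hfc]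
          have hcond : (PySem.Str.strip l ≠ "" ∧ pvCurOf b h ≠ []) := by simp [hcur0, he]
          rw [if_pos hcond, hcur0]
          have hfc' : pvB_firstCmd? (b ++ [PySem.Str.strip l]) = some (PySem.Str.strip l) :=
            pv_firstCmd_append_none hfc he
          have hcur' : pvCurOf (b ++ [PySem.Str.strip l]) h = [] := by
            unfold pvCurOf; rw [hfc']
          have hem0 : pvB_emit ex (h :: b) = ex := pv_emit_of_none h ex hfc
          by_cases hmi : PySem.Str.startswith (PySem.Str.strip l) "More information:" = true
          · rw [if_neg (not_not_intro hmi)]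
            have hem' : pvB_emit ex (h :: (b ++ [PySem.Str.strip l])) = ex := by
              rw [pv_emit_cons, hfc']
              exact if_neg (not_not_intro hmi)
            rw [hem0]
            have := ih h (b ++ [PySem.Str.strip l]) ex
            rw [hcur', hem'] at this
            exact this
          · rw [if_pos hmi]
            have hem' : pvB_emit ex (h :: (b ++ [PySem.Str.strip l]))
                = ex ++ [(h, PySem.Str.strip l)] := by
              rw [pv_emit_cons, hfc']
              exact if_pos hmi
            rw [hem0, pvJoin_singleton]
            have := ih h (b ++ [PySem.Str.strip l]) ex
            rw [hcur', hem'] at this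
            exact this

-- ---- phase 1: A's description loop + handoff = B's pipeline ----

theorem pvDOf_append (ws : List String) (s : String) :
    pvDOf (ws ++ [s]) = if s ≠ "" then pvDOf ws ++ s ++ " " else pvDOf ws := by
  by_cases hs : s = "" <;> simp [pvDOf, List.filter_append, hs]

theorem pvDesc (ws : List String) (hws : ∀ w ∈ ws, PySem.Str.strip w = w) :
    PySem.Str.strip (pvDOf ws) = PySem.Str.join " " (ws.filter (fun l => l ≠ "")) :=
  pvSL _ (fun v hv => ⟨by simpa using (List.mem_filter.mp hv).2, hws v (List.mem_filter.mp hv).1⟩)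

set_option maxHeartbeats 2000000 in
theorem pvP (L : List String) (ws : List String) (hws : ∀ w ∈ ws, PySem.Str.strip w = w) :
    (PySem.Str.strip (pvA_descLoop L (pvDOf ws)).1, pvA_exLoop (pvA_descLoop L (pvDOf ws)).2 [] [])
    = (PySem.Str.join " " ((PySem.List.pyGetD ((L.map PySem.Str.strip).foldl pvB_addLine [ws]) 0 []).filter (fun l => l ≠ "")),
       (PySem.List.slice ((L.map PySem.Str.strip).foldl pvB_addLine [ws]) (some 1) none).foldl pvB_emit []) := by
  induction L generalizing ws with
  | nil =>
    simp only [List.map_nil, List.foldl_nil, pvA_descLoop, pvA_exLoop,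
               PySem.List.pyGetD_zero_cons, PySem.List.slice_from_one, List.tail_cons]
    exact Prod.ext_iff.mpr ⟨pvDesc ws hws, rfl⟩
  | cons l L ih =>
    simp only [List.map_cons, List.foldl_cons, pvA_descLoop]
    by_cases hc : PySem.Str.endswith (PySem.Str.strip l) ":" = true
    · rw [if_pos hc]
      have hstep : pvB_addLine [ws] (PySem.Str.strip l)
          = [ws] ++ [[PySem.Str.slice (PySem.Str.strip l) none (some (-1))]] := by
        unfold pvB_addLine; rw [if_pos hc]
      rw [hstep, pv_addLine_prepend _ _ _ (by simp), List.singleton_append,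
          PySem.List.pyGetD_zero_cons, PySem.List.slice_from_one, List.tail_cons]
      refine Prod.ext_iff.mpr ⟨pvDesc ws hws, ?_⟩
      show pvA_exLoop (l :: L) [] [] = _
      simp only [pvA_exLoop]
      rw [if_pos hc]
      have := pvQ L (PySem.Str.slice (PySem.Str.strip l) none (some (-1))) [] []
      rw [show pvCurOf [] (PySem.Str.slice (PySem.Str.strip l) none (some (-1)))
            = [PySem.Str.slice (PySem.Str.strip l) none (some (-1))] from rfl,
          pv_emit_of_none _ _ (show pvB_firstCmd? ([] : List String) = none from rfl)] at this
      exact this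
    · rw [if_neg hc]
      rw [show (if PySem.Str.strip l ≠ "" then pvDOf ws ++ PySem.Str.strip l ++ " " else pvDOf ws)
            = pvDOf (ws ++ [PySem.Str.strip l]) from (pvDOf_append ws (PySem.Str.strip l)).symm]
      have hstep : pvB_addLine [ws] (PySem.Str.strip l) = [ws ++ [PySem.Str.strip l]] := by
        unfold pvB_addLine; rw [if_neg hc]; simp
      rw [hstep]
      exact ih (ws ++ [PySem.Str.strip l]) (by
        intro w hw
        rcases List.mem_append.mp hw with h1 | h2
        · exact hws w h1
        · rw [List.mem_singleton.mp h2]; exact pv_strip_idem l)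

-- ===== VERDICT =====
theorem parse_tldr_output_spec : Claim_equal_parse_tldr_output := by
  intro content _
  unfold Spec_parse_tldr_output parse_tldr_output parse_tldr_output_alt
  have := pvP ((PySem.Str.split? (PySem.Str.strip content) "\n").getD []) [] (by simp)
  simpa [pvDOf] using this
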